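-- pv_equiv track=rewrite | github.com/keagoncm21/CS101L | Assignment9/SourceCode/Assignment9.py | create_reported_date_dict
-- ===== SOURCE A (Python) =====
-- def create_reported_date_dict(csvlist):
--     ''' takes a list, which is the list of lists returned from the read_in_file function above and returns a dictionary where the key is a date of the year found in index 1,
--     and the value is how many times a crime occurred on that data as read from the file'''
--     dictlist = {}
--     klist = csvlist[0].index('Reported_Date')
--     for i in csvlist[1:]: #creating new dictionary of reported crime and how much it occured
--         if i[klist] in dictlist:
--             dictlist[i[klist]] += 1
--         if i[klist] not in dictlist:
--             dictlist[i[klist]] = 1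
--     return dictlist
-- ===== SOURCE B (Python) =====
-- def create_reported_date_dict(csvlist):
--     ''' same result as A: dict mapping each Reported_Date column value (first-occurrence
--     order) to the number of rows carrying it '''
--     klist = csvlist[0].index('Reported_Date')
--     col = [row[klist] for row in csvlist[1:]]
--     return {v: col.count(v) for v in dict.fromkeys(col)}
-- ===== Notes on version B (the rewrite author's own statement) =====
-- stated objective: simpler
-- what changed: Replaces A's single-pass mutable-dict counting loop (with its redundant double membership test) by extracting the column once, deduplicating it with dict.fromkeys to get the keys in first-occurrence order, and building the result with a comprehension that counts each distinct value via list.count.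
import Mathlib
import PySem

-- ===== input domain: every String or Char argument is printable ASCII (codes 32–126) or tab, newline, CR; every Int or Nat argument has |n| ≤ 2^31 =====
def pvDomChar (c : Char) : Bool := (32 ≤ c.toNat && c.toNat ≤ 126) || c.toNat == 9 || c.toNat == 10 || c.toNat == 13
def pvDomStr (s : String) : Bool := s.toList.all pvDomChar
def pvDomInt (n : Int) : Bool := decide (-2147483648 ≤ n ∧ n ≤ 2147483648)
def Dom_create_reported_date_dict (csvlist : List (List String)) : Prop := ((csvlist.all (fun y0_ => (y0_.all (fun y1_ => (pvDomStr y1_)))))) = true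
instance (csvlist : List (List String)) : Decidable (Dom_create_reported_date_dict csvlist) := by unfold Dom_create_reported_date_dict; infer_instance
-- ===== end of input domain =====

-- B replaces A's single-pass mutable-dict counting loop by dedup-the-column-then-count-each-key; simpler decomposition, same results.


-- ===== PORT A =====
-- literal transliteration of A: header index, then a fold over the tail rows with
-- A's two sequential membership tests mutating a dict; returns the dict's items.
-- (Pre_ excludes the inputs where Python raises, so the getD defaults are never hit.)
def create_reported_date_dict (csvlist : List (List String)) : List (String × Int) :=
  match csvlist with
  | [] => []  -- Python: IndexError (excluded by Pre_)
  | header :: rows =>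
    match PySem.List.index? header "Reported_Date" with
    | none => []  -- Python: ValueError (excluded by Pre_)
    | some klist =>
      (rows.foldl (fun dictlist i =>
        let key := PySem.List.pyGetD i (klist : Int) ""  -- i[klist]; short rows excluded by Pre_
        let d1 := if dictlist.contains key then dictlist.insert key (dictlist.getD key 0 + 1) else dictlist
        if d1.contains key = false then d1.insert key 1 else d1) (PySem.Dict.empty : PySem.Dict String Int)).items

-- ===== PORT B =====
-- literal transliteration of B: extract the column, dedup it (dict.fromkeys), count each key.
def create_reported_date_dict_alt (csvlist : List (List String)) : List (String × Int) :=
  match csvlist with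
  | [] => []
  | header :: rows =>
    match PySem.List.index? header "Reported_Date" with
    | none => []
    | some klist =>
      let col := rows.map (fun row => PySem.List.pyGetD row (klist : Int) "")
      (PySem.List.dedup col).map (fun v => (v, (col.count v : Int)))

-- ===== PRECONDITION & SPEC =====
-- Pre_ excludes exactly the inputs where Python A raises: the empty list (IndexError on csvlist[0]),
-- a header without 'Reported_Date' (ValueError from .index), and a data row too short for that column (IndexError).
def Pre_create_reported_date_dict (csvlist : List (List String)) : Prop :=
  csvlist ≠ [] ∧ "Reported_Date" ∈ csvlist.headI ∧
    ∀ row ∈ csvlist.tail, csvlist.headI.idxOf "Reported_Date" < row.length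
instance (csvlist : List (List String)) : Decidable (Pre_create_reported_date_dict csvlist) := by
  unfold Pre_create_reported_date_dict; infer_instance
def pvWitness_create_reported_date_dict : List (List String) :=
  [["x", "Reported_Date"], ["a", "d1"], ["b", "d2"], ["c", "d1"]]

def Spec_create_reported_date_dict (csvlist : List (List String)) (out : List (String × Int)) : Prop := out = create_reported_date_dict_alt csvlist
instance (csvlist : List (List String)) (out : List (String × Int)) : Decidable (Spec_create_reported_date_dict csvlist out) := by unfold Spec_create_reported_date_dict; infer_instance

-- ===== CLAIM (what is proved, stated in full; the proofs are below) =====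
def Claim_equal_create_reported_date_dict : Prop := ∀ (csvlist : List (List String)), Dom_create_reported_date_dict csvlist → Pre_create_reported_date_dict csvlist → Spec_create_reported_date_dict csvlist (create_reported_date_dict csvlist)

-- ===== LEMMAS AND PROOFS =====

-- A's loop body (two sequential membership tests) is the canonical counter step.
theorem stepA_eq_counter_step (d : PySem.Dict String Int) (key : String) :
    (let d1 := if d.contains key then d.insert key (d.getD key 0 + 1) else d
     if d1.contains key = false then d1.insert key 1 else d1)
    = d.insert key (d.getD key 0 + 1) := by
  by_cases h : d.contains key = true
  · simp [h, PySem.Dict.contains_insert_self]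
  · have h' : d.contains key = false := by simpa using h
    rw [PySem.Dict.getD_of_not_contains d (0 : Int) h']
    simp [h']

-- the whole body of A, for a fixed column index, equals the whole body of B
theorem body_eq (klist : Nat) (rows : List (List String)) :
    (rows.foldl (fun dictlist i =>
        let key := PySem.List.pyGetD i (klist : Int) ""
        let d1 := if dictlist.contains key then dictlist.insert key (dictlist.getD key 0 + 1) else dictlist
        if d1.contains key = false then d1.insert key 1 else d1)
      (PySem.Dict.empty : PySem.Dict String Int)).items
    = (PySem.List.dedup (rows.map (fun row => PySem.List.pyGetD row (klist : Int) ""))).map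
        (fun v => (v, ((rows.map (fun row => PySem.List.pyGetD row (klist : Int) "")).count v : Int))) := by
  have hfold :
      rows.foldl (fun dictlist i =>
        let key := PySem.List.pyGetD i (klist : Int) ""
        let d1 := if dictlist.contains key then dictlist.insert key (dictlist.getD key 0 + 1) else dictlist
        if d1.contains key = false then d1.insert key 1 else d1)
        (PySem.Dict.empty : PySem.Dict String Int)
      = (rows.map (fun row => PySem.List.pyGetD row (klist : Int) "")).foldl
          (fun d x => d.insert x (d.getD x 0 + 1)) (PySem.Dict.empty : PySem.Dict String Int) := by
    rw [List.foldl_map]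
    exact PySem.List.foldl_congr_mem _ _ _ _ (fun d i _ =>
      stepA_eq_counter_step d (PySem.List.pyGetD i (klist : Int) ""))
  rw [hfold, PySem.Dict.foldl_insert_getD_add_one_eq_counter, PySem.Dict.items_counter]
  simp [PySem.List.dedup_eq_ofList]

-- ===== VERDICT (by name: the statement is the Claim_ definition above) =====
theorem create_reported_date_dict_spec : Claim_equal_create_reported_date_dict := by
  intro csvlist _ _
  unfold Spec_create_reported_date_dict create_reported_date_dict create_reported_date_dict_alt
  cases csvlist with
  | nil => rfl
  | cons header rows =>
    dsimp only
    cases h : PySem.List.index? header "Reported_Date" with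
    | none => rfl
    | some klist => exact body_eq klist rows
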